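-- pv_equiv track=rewrite | github.com/ND-SAFA/SAFA | tgen/common/util/file_util.py | order_paths_by_overlap
-- ===== SOURCE A (Python) =====
-- from typing import Any, Callable, Dict, IO, List, Optional, Tuple, Type, Union
--
-- def order_paths_by_overlap(paths: List[str], reverse: bool = False) -> List[str]:
--     """
--     Orders the paths so that base paths come before any branches (e.g. root before root/dir1 before root/dir1/dir2)
--     :param paths: The list of unordered paths
--     :param reverse: If True, returns the most overlap to the least (e.g. root AFTER root/dir1 AFTEr root/dir1/dir2)
--     :return: The ordered paths
--     """
--     orderings = {}
--     for a in paths: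
--         ordered = [a]
--         for b in paths:
--             if a == b:
--                 continue
--             if a in b:
--                 ordered.append(b)
--             elif b in a:
--                 ordered.insert(0, b)
--         orderings[a] = ordered
--     final_orderings = []
--     for path, ordering in orderings.items():
--         if path == ordering[0]:
--             if reverse:
--                 ordering.reverse()
--             final_orderings.extend(ordering)
--     return final_orderings
-- ===== SOURCE B (Python) =====
-- from typing import List
--
-- def order_paths_by_overlap(paths: List[str], reverse: bool = False) -> List[str]:
--     # A proper substring is strictly shorter, so after deduping we scan the
--     # distinct paths shortest-first: a path is a base path iff none of the
--     # already-scanned (shorter) distinct paths occurs inside it.  Then the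
--     # base paths are emitted in first-occurrence order, each followed by the
--     # strictly longer paths that contain it (in original order).
--     distinct = list(dict.fromkeys(paths))
--     bases = set()
--     seen = []
--     for a in sorted(distinct, key=len):
--         if not any(b in a for b in seen):
--             bases.add(a)
--         seen.append(a)
--     out = []
--     for a in distinct:
--         if a in bases:
--             group = [a] + [b for b in paths if len(a) < len(b) and a in b]
--             out.extend(reversed(group) if reverse else group)
--     return out
-- ===== Notes on version B (the rewrite author's own statement) =====
-- stated objective: faster
-- what changed: B replaces A's per-path orderings dict (insert-at-front chain building for every path, then the ordering[0] post-filter) by a sort-based algorithm: dedup the paths, sort the distinct ones by length, decide base-path status in one shortest-first sweep that tests each distinct path only against the already-seen shorter ones (a proper substring is strictly shorter), and emit the groups with a strict length comparison.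
import Mathlib
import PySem

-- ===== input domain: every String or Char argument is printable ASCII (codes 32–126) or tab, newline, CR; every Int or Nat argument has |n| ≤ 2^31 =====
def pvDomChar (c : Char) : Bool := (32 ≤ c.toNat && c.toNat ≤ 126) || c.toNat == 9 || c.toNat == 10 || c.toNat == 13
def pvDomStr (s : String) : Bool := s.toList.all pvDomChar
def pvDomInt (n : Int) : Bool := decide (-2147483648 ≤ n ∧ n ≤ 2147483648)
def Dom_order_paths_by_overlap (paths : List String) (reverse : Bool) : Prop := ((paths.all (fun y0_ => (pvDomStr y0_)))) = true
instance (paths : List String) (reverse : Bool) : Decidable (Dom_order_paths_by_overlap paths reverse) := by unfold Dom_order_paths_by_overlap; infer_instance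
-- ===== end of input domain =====

-- B replaces A's per-path orderings dict by a sort-based algorithm: dedup, sort the distinct
-- paths by length, decide base-path status in one shortest-first sweep against only the
-- already-seen shorter paths, then emit each base with its strictly longer containers
-- (measured faster in a timing run).

-- ===== PORT A =====
def order_paths_by_overlap (paths : List String) (reverse : Bool) : List String :=
  let orderings : PySem.Dict String (List String) :=
    paths.foldl (fun orderings a =>
      let ordered : List String :=
        paths.foldl (fun ordered b =>
          if a == b then ordered
          else if PySem.Str.isIn a b then ordered ++ [b]
          else if PySem.Str.isIn b a then b :: ordered
          else ordered) [a]
      orderings.insert a ordered) PySem.Dict.empty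
  orderings.items.foldl (fun final_orderings pr =>
    if PySem.List.pyGet? pr.2 0 == some pr.1 then
      final_orderings ++ (if reverse then pr.2.reverse else pr.2)
    else final_orderings) []

-- ===== PORT B =====
def order_paths_by_overlap_alt (paths : List String) (reverse : Bool) : List String :=
  let distinct : List String := PySem.List.dedup paths
  let st : PySem.Set String × List String :=
    (PySem.List.sorted distinct (fun s => s.length) false).foldl
      (fun st a =>
        (if st.2.any (fun b => PySem.Str.isIn b a) then st.1 else PySem.Set.add st.1 a,
         st.2 ++ [a]))
      (PySem.Set.empty, [])
  distinct.foldl (fun out a =>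
    if PySem.Set.contains st.1 a then
      let group : List String :=
        a :: paths.filter (fun b => decide (a.length < b.length) && PySem.Str.isIn a b)
      out ++ (if reverse then group.reverse else group)
    else out) []

-- ===== PRECONDITION & SPEC =====
def Spec_order_paths_by_overlap (paths : List String) (reverse : Bool) (out : List String) : Prop := out = order_paths_by_overlap_alt paths reverse
instance (paths : List String) (reverse : Bool) (out : List String) : Decidable (Spec_order_paths_by_overlap paths reverse out) := by unfold Spec_order_paths_by_overlap; infer_instance

-- ===== CLAIM (what is proved, stated in full; the proofs are below) =====
def Claim_equal_order_paths_by_overlap : Prop := ∀ (paths : List String) (reverse : Bool), Dom_order_paths_by_overlap paths reverse → Spec_order_paths_by_overlap paths reverse (order_paths_by_overlap paths reverse)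

-- ===== LEMMAS AND PROOFS =====

-- the paths b that A's inner loop inserts at the front of `ordered`
def pvPre (a : String) : String → Bool :=
  fun b => !(a == b) && !(PySem.Str.isIn a b) && PySem.Str.isIn b a
-- the paths b that A's inner loop appends (supersets of a)
def pvApp (a : String) : String → Bool :=
  fun b => !(a == b) && PySem.Str.isIn a b
-- A's inner loop, as a function of a
def pvF (paths : List String) (a : String) : List String :=
  paths.foldl (fun ordered b =>
    if a == b then ordered
    else if PySem.Str.isIn a b then ordered ++ [b]
    else if PySem.Str.isIn b a then b :: ordered
    else ordered) [a]
-- "a is not minimal": some other path is a proper substring of a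
def pvR (paths : List String) (a : String) : Bool :=
  paths.any (fun b => b != a && PySem.Str.isIn b a)
-- B's bases, as a function of the sorted distinct list
def pvBases (l : List String) : PySem.Set String :=
  (l.foldl (fun (st : PySem.Set String × List String) a =>
      (if st.2.any (fun b => PySem.Str.isIn b a) then st.1 else PySem.Set.add st.1 a,
       st.2 ++ [a]))
    (PySem.Set.empty, [])).1

theorem pv_isIn_len (a b : String) (h : PySem.Str.isIn a b = true) : a.length ≤ b.length := by
  rw [PySem.Str.isIn_iff_infix] at h
  simpa using h.sublist.length_le

theorem pv_isIn_eq_of_len (a b : String) (h : PySem.Str.isIn a b = true)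
    (hl : a.length = b.length) : a = b := by
  rw [PySem.Str.isIn_iff_infix] at h
  exact String.toList_inj.mp (h.sublist.eq_of_length (by simpa using hl))

theorem pv_isIn_lt (a b : String) (h : PySem.Str.isIn a b = true) (hne : a ≠ b) :
    a.length < b.length :=
  lt_of_le_of_ne (pv_isIn_len a b h) (fun he => hne (pv_isIn_eq_of_len a b h he))

theorem pvF_shape (a : String) (l acc : List String) :
    l.foldl (fun ordered b =>
      if a == b then ordered
      else if PySem.Str.isIn a b then ordered ++ [b]
      else if PySem.Str.isIn b a then b :: ordered
      else ordered) acc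
    = (l.filter (pvPre a)).reverse ++ acc ++ l.filter (pvApp a) := by
  induction l generalizing acc with
  | nil => simp
  | cons b t ih =>
    simp only [List.foldl_cons, List.filter_cons, ih, pvPre, pvApp]
    by_cases h1 : (a == b) = true
    · simp [h1]
    · by_cases h2 : PySem.Chars.isIn a.toList b.toList = true
      · simp [h1, h2]
      · by_cases h3 : PySem.Chars.isIn b.toList a.toList = true
        · simp [h1, h2, h3]
        · simp [h1, h2, h3]

theorem pv_dictBuild (f : String → List String) (l : List String) : ∀ (s : List String),
    (l.foldl (fun d a => d.insert a (f a)) (PySem.Dict.mk (s.map (fun a => (a, f a))))).items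
    = (l.foldl PySem.Set.add s).map (fun a => (a, f a)) := by
  induction l with
  | nil => intro s; rfl
  | cons a t ih =>
    intro s
    simp only [List.foldl_cons]
    have hins : (PySem.Dict.mk (s.map (fun a => (a, f a)))).insert a (f a)
        = PySem.Dict.mk ((PySem.Set.add s a).map (fun a => (a, f a))) := by
      apply PySem.Dict.ext
      by_cases hs : a ∈ s
      · rw [PySem.Dict.items_insert_of_contains (h := by simp [hs])]
        simp only [PySem.Set.add, PySem.Set.contains, List.contains_eq_mem, hs, decide_true,
          if_true, List.map_map]
        apply List.map_congr_left
        intro b _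
        by_cases hb : (b == a) = true
        · simp [eq_of_beq hb]
        · have hba : ¬ b = a := by simpa using hb
          simp [hba]
      · rw [PySem.Dict.items_insert_of_not_contains (h := by
          simp; exact fun x hx h => hs (h ▸ hx))]
        simp [PySem.Set.add, PySem.Set.contains, List.contains_eq_mem, hs]
    rw [hins, ih]

theorem pv_pyGet0 (l : List String) : PySem.List.pyGet? l 0 = l.head? := by
  simp [PySem.List.pyGet?, PySem.List.pyIdx?]
  cases l <;> simp

-- A's ordering[0] test agrees with the minimality test
theorem pv_cond (paths : List String) (a : String) :
    (PySem.List.pyGet? (pvF paths a) 0 == some a) = !(pvR paths a) := by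
  unfold pvF pvR
  rw [pvF_shape, pv_pyGet0]
  cases hrev : (paths.filter (pvPre a)).reverse with
  | nil =>
    have hnil : paths.filter (pvPre a) = [] := List.reverse_eq_nil_iff.mp hrev
    have hany : paths.any (fun b => b != a && PySem.Str.isIn b a) = false := by
      rw [List.any_eq_false]
      intro b hb hcontra
      rcases Bool.and_eq_true _ _ |>.mp hcontra with ⟨h1, hin⟩
      have hba : ¬ b = a := by simpa using h1
      have hnot : PySem.Str.isIn a b = false := by
        cases hab : PySem.Str.isIn a b
        · rfl
        · exact absurd (le_antisymm (pv_isIn_len a b hab) (pv_isIn_len b a hin)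
            |> pv_isIn_eq_of_len a b hab).symm hba
      have hpre : pvPre a b = true := by
        simp only [pvPre, hin, Bool.and_true]
        have : (a == b) = false := by simpa using fun h => hba h.symm
        simp only [this, Bool.not_false, Bool.true_and]
        simpa using hnot
      exact absurd hpre (by simp [List.filter_eq_nil_iff.mp hnil b hb])
    have hany' : (paths.any fun b => b != a && PySem.Chars.isIn b.toList a.toList) = false := by
      simpa using hany
    simp [hany']
  | cons c cs =>
    have hc : c ∈ paths.filter (pvPre a) := by
      have : c ∈ (paths.filter (pvPre a)).reverse := by rw [hrev]; exact List.mem_cons_self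
      simpa using this
    obtain ⟨hcp, hP⟩ := List.mem_filter.mp hc
    simp only [pvPre, Bool.and_eq_true, Bool.not_eq_true'] at hP
    obtain ⟨⟨hac, hnin⟩, hin⟩ := hP
    have hca : ¬ c = a := by
      intro h
      rw [h] at hac
      simp at hac
    have hany : paths.any (fun b => b != a && PySem.Str.isIn b a) = true := by
      rw [List.any_eq_true]
      refine ⟨c, hcp, ?_⟩
      simp only [Bool.and_eq_true, bne]
      constructor
      · simpa using hca
      · simpa using hin
    have hany' : (paths.any fun b => b != a && PySem.Chars.isIn b.toList a.toList) = true := by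
      simpa using hany
    simp [hca, hany']

-- membership in the bases accumulator of B's shortest-first sweep
theorem pv_basesAux (a : String) : ∀ (l seen acc : List String),
    (seen ++ l).Nodup →
    (∀ b ∈ seen, ∀ c ∈ l, b.length ≤ c.length) →
    l.Pairwise (fun x y => x.length ≤ y.length) →
    (a ∈ (l.foldl (fun (st : PySem.Set String × List String) c =>
        (if st.2.any (fun b => PySem.Str.isIn b c) then st.1 else PySem.Set.add st.1 c,
         st.2 ++ [c])) (acc, seen)).1
     ↔ a ∈ acc ∨ (a ∈ l ∧ ∀ b, (b ∈ seen ∨ b ∈ l) →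
          PySem.Str.isIn b a = true → ¬ b.length < a.length)) := by
  intro l
  induction l with
  | nil => intro seen acc _ _ _; simp
  | cons c t ih =>
    intro seen acc hnd hord hpl
    have hnd' : ((seen ++ [c]) ++ t).Nodup := by
      simpa [List.append_assoc] using hnd
    obtain ⟨hnds, hndct, hdisj⟩ := List.nodup_append.mp hnd
    have hcseen : c ∉ seen := fun h => hdisj c h c List.mem_cons_self rfl
    have hplc : ∀ y ∈ t, c.length ≤ y.length := (List.pairwise_cons.mp hpl).1
    have hplt : t.Pairwise (fun x y => x.length ≤ y.length) := (List.pairwise_cons.mp hpl).2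
    have hord' : ∀ b ∈ seen ++ [c], ∀ c' ∈ t, b.length ≤ c'.length := by
      intro b hb c' hc'
      rcases List.mem_append.mp hb with hb | hb
      · exact hord b hb c' (List.mem_cons_of_mem _ hc')
      · rw [List.mem_singleton.mp hb]; exact hplc c' hc'
    simp only [List.foldl_cons]
    rw [ih (seen ++ [c]) _ hnd' hord' hplt]
    have hmem : ∀ b, ((b ∈ seen ++ [c] ∨ b ∈ t) ↔ (b ∈ seen ∨ b ∈ c :: t)) := by
      intro b
      simp only [List.mem_append, List.mem_cons]
      tauto
    by_cases hany : seen.any (fun b => PySem.Str.isIn b c) = true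
    · have hPcFalse : ¬ (∀ b, (b ∈ seen ∨ b ∈ c :: t) →
          PySem.Str.isIn b c = true → ¬ b.length < c.length) := by
        obtain ⟨b, hbseen, hbin⟩ := List.any_eq_true.mp hany
        intro hP
        have hbne : b ≠ c := fun h => hcseen (h ▸ hbseen)
        exact hP b (Or.inl hbseen) hbin (pv_isIn_lt b c hbin hbne)
      rw [if_pos hany]
      constructor
      · rintro (h | ⟨h1, h2⟩)
        · exact Or.inl h
        · exact Or.inr ⟨List.mem_cons_of_mem _ h1,
            fun b hb hin => (h2 b ((hmem b).mpr hb) hin)⟩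
      · rintro (h | ⟨h1, h2⟩)
        · exact Or.inl h
        · rcases List.mem_cons.mp h1 with rfl | h1
          · exact absurd h2 hPcFalse
          · exact Or.inr ⟨h1, fun b hb hin => h2 b ((hmem b).mp hb) hin⟩
    · have hnone : ∀ b ∈ seen, PySem.Str.isIn b c = false := by
        intro b hb
        have h := List.any_eq_false.mp (by simpa using hany) b hb
        simpa using h
      have hPc : ∀ b, (b ∈ seen ∨ b ∈ c :: t) →
          PySem.Str.isIn b c = true → ¬ b.length < c.length := by
        rintro b (hb | hb) hin
        · rw [hnone b hb] at hin; cases hin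
        · rcases List.mem_cons.mp hb with rfl | hb
          · exact lt_irrefl _
          · exact not_lt.mpr (hplc b hb)
      rw [if_neg hany, show (a ∈ PySem.Set.add acc c) ↔ (a ∈ acc ∨ a = c) from
        PySem.Set.mem_add acc c a]
      constructor
      · rintro ((h | rfl) | ⟨h1, h2⟩)
        · exact Or.inl h
        · exact Or.inr ⟨List.mem_cons_self, hPc⟩
        · exact Or.inr ⟨List.mem_cons_of_mem _ h1,
            fun b hb hin => h2 b ((hmem b).mpr hb) hin⟩
      · rintro ((h | ⟨h1, h2⟩))
        · exact Or.inl (Or.inl h)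
        · rcases List.mem_cons.mp h1 with rfl | h1
          · exact Or.inl (Or.inr rfl)
          · exact Or.inr ⟨h1, fun b hb hin => h2 b ((hmem b).mp hb) hin⟩

-- B's base-path set contains exactly the minimal paths
theorem pv_bases_eq (paths : List String) (a : String) (ha : a ∈ paths) :
    PySem.Set.contains
      (pvBases (PySem.List.sorted (PySem.List.dedup paths) (fun s => s.length) false)) a
      = !(pvR paths a) := by
  have hperm : (PySem.List.sorted (PySem.List.dedup paths) (fun s => s.length) false).Perm
      (PySem.List.dedup paths) := PySem.List.sorted_perm _ _ _
  have hnodup : (PySem.List.sorted (PySem.List.dedup paths) (fun s => s.length) false).Nodup :=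
    hperm.nodup_iff.mpr (PySem.List.nodup_dedup paths)
  have hpl : (PySem.List.sorted (PySem.List.dedup paths) (fun s => s.length) false).Pairwise
      (fun x y => x.length ≤ y.length) := PySem.List.sorted_pairwise _ _
  have hmemL : ∀ x, x ∈ PySem.List.sorted (PySem.List.dedup paths) (fun s => s.length) false
      ↔ x ∈ paths := by
    intro x
    rw [hperm.mem_iff, PySem.List.mem_dedup]
  have hmm := pv_basesAux a
    (PySem.List.sorted (PySem.List.dedup paths) (fun s => s.length) false) [] PySem.Set.empty
    (by simpa using hnodup) (by simp) hpl
  have hiff : (∀ b ∈ paths, PySem.Str.isIn b a = true → ¬ b.length < a.length)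
      ↔ pvR paths a = false := by
    constructor
    · intro h
      rw [pvR, List.any_eq_false]
      intro b hb hcontra
      obtain ⟨h1, h2⟩ := Bool.and_eq_true _ _ |>.mp hcontra
      have hne : b ≠ a := by simpa using h1
      exact h b hb h2 (pv_isIn_lt b a h2 hne)
    · intro h b hb hin hlt
      have hne : b ≠ a := fun e => absurd hlt (by rw [e]; exact lt_irrefl _)
      have htrue : pvR paths a = true := by
        unfold pvR
        rw [List.any_eq_true]
        exact ⟨b, hb, by rw [Bool.and_eq_true]; exact ⟨by simpa using hne, hin⟩⟩
      rw [htrue] at h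
      cases h
  have hmem_bases : a ∈ pvBases
      (PySem.List.sorted (PySem.List.dedup paths) (fun s => s.length) false)
      ↔ pvR paths a = false := by
    unfold pvBases
    rw [hmm]
    constructor
    · rintro (h | ⟨_, h2⟩)
      · exact absurd h (by simp [PySem.Set.empty])
      · exact hiff.mp (fun b hb => h2 b (Or.inr ((hmemL b).mpr hb)))
    · intro h
      refine Or.inr ⟨(hmemL a).mpr ha, ?_⟩
      intro b hb hin
      have hbp : b ∈ paths := by
        rcases hb with hb | hb
        · cases hb
        · exact (hmemL b).mp hb
      exact hiff.mpr h b hbp hin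
  cases hr : pvR paths a with
  | false =>
    have := hmem_bases.mpr hr
    simpa using (PySem.Set.contains_iff _ _).mpr this
  | true =>
    have : a ∉ pvBases (PySem.List.sorted (PySem.List.dedup paths) (fun s => s.length) false) :=
      fun h => by rw [hmem_bases.mp h] at hr; cases hr
    simp only [Bool.not_true]
    cases hc : PySem.Set.contains
        (pvBases (PySem.List.sorted (PySem.List.dedup paths) (fun s => s.length) false)) a
    · rfl
    · exact absurd ((PySem.Set.contains_iff _ _).mp hc) this

theorem order_paths_by_overlap_spec : Claim_equal_order_paths_by_overlap := by
  intro paths reverse _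
  show order_paths_by_overlap paths reverse = order_paths_by_overlap_alt paths reverse
  have hA : order_paths_by_overlap paths reverse
      = ((paths.foldl (fun d a => d.insert a (pvF paths a))
          (PySem.Dict.mk (([] : List String).map (fun a => (a, pvF paths a))))).items).foldl
        (fun acc pr =>
          if PySem.List.pyGet? pr.2 0 == some pr.1 then
            acc ++ (if reverse then pr.2.reverse else pr.2)
          else acc) [] := rfl
  have hB : order_paths_by_overlap_alt paths reverse
      = (PySem.List.dedup paths).foldl (fun out a =>
          if PySem.Set.contains
              (pvBases (PySem.List.sorted (PySem.List.dedup paths) (fun s => s.length) false)) a then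
            out ++ (if reverse then
              (a :: paths.filter (fun b => decide (a.length < b.length) && PySem.Str.isIn a b)).reverse
            else a :: paths.filter (fun b => decide (a.length < b.length) && PySem.Str.isIn a b))
          else out) [] := rfl
  rw [hA, hB, pv_dictBuild, List.foldl_map]
  rw [PySem.List.foldl_if_eq_foldl_filter
        (p := fun a => PySem.List.pyGet? (pvF paths a) 0 == some a)
        (f := fun acc a => acc ++ (if reverse then (pvF paths a).reverse else pvF paths a))]
  rw [PySem.List.foldl_if_eq_foldl_filter
        (p := fun a => PySem.Set.contains
          (pvBases (PySem.List.sorted (PySem.List.dedup paths) (fun s => s.length) false)) a)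
        (f := fun out a => out ++ (if reverse then
            (a :: paths.filter (fun b => decide (a.length < b.length) && PySem.Str.isIn a b)).reverse
          else a :: paths.filter (fun b => decide (a.length < b.length) && PySem.Str.isIn a b)))]
  rw [PySem.List.foldl_append_eq_flatMap, PySem.List.foldl_append_eq_flatMap]
  have hdedup : PySem.List.dedup paths = paths.foldl PySem.Set.add [] := by
    rw [PySem.List.dedup_eq_ofList, PySem.Set.ofList_eq_foldl]
  rw [List.filter_congr (l := paths.foldl PySem.Set.add [])
      (fun a ha => pv_cond paths a)]
  rw [List.filter_congr (l := PySem.List.dedup paths)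
      (fun a ha => pv_bases_eq paths a ((PySem.List.mem_dedup paths a).mp ha))]
  rw [hdedup]
  simp only [List.nil_append]
  apply List.flatMap_congr
  intro a ha
  obtain ⟨hamem, hq⟩ := List.mem_filter.mp ha
  have hr : pvR paths a = false := by simpa using hq
  have hfil : paths.filter (pvPre a) = [] := by
    rw [List.filter_eq_nil_iff]
    intro b hb hpre
    simp only [pvPre, Bool.and_eq_true, Bool.not_eq_true'] at hpre
    obtain ⟨⟨hab, _⟩, hin⟩ := hpre
    have : pvR paths a = true := by
      unfold pvR
      rw [List.any_eq_true]
      refine ⟨b, hb, ?_⟩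
      simp only [Bool.and_eq_true, bne]
      refine ⟨?_, hin⟩
      rw [Bool.beq_comm] at hab
      simpa using hab
    rw [this] at hr
    exact absurd hr (by simp)
  have hpvF : pvF paths a = a :: paths.filter (pvApp a) := by
    unfold pvF
    rw [pvF_shape, hfil]
    rfl
  have hfil2 : paths.filter (fun b => decide (a.length < b.length) && PySem.Str.isIn a b)
      = paths.filter (pvApp a) := by
    apply List.filter_congr
    intro b _
    simp only [pvApp]
    cases hin : PySem.Chars.isIn a.toList b.toList with
    | false => simp [hin]
    | true =>
      have hin' : PySem.Str.isIn a b = true := by simpa using hin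
      by_cases hab : a = b
      · subst hab
        simp [hin]
      · have hlt := pv_isIn_lt a b hin' hab
        simp [hin, hlt, hab]
  simp only [PySem.Str.isIn_eq] at hfil2
  cases reverse <;> simp [hpvF, hfil2]
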